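-- pv_equiv track=rewrite | github.com/scrimshawlife-ctrl/Abraxas | webpanel/preference_kernel.py | prefs_focus_priority
-- ===== SOURCE A (Python) =====
-- from typing import Any, Dict, Iterable, List, Optional, Tuple
--
-- def prefs_focus_priority(lines: List[str], focus: List[str]) -> List[str]:
--     if not focus:
--         return lines
--
--     def score(line: str) -> Tuple[int, str]:
--         lowered = line.lower()
--         for token in focus:
--             if token.lower() in lowered:
--                 return (0, line)
--         return (1, line)
--
--     return [line for _, line in sorted([(score(line), line) for line in lines], key=lambda item: item[0])]
-- ===== SOURCE B (Python) =====
-- def prefs_focus_priority(lines, focus):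
--     if not focus:
--         return lines
--     toks = [t.lower() for t in focus]
--     matched = []
--     unmatched = []
--     for line in lines:
--         low = line.lower()
--         if any(t in low for t in toks):
--             matched.append(line)
--         else:
--             unmatched.append(line)
--     return sorted(matched) + sorted(unmatched)
-- ===== Notes on version B (the rewrite author's own statement) =====
-- stated objective: simpler
-- what changed: Replaces A's per-line scoring closure and one tuple-keyed sort of (score, line) pairs by a single partitioning pass into matched/unmatched lists (with focus tokens lowered once up front) followed by two plain lexicographic sorts concatenated.
import Mathlib
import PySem

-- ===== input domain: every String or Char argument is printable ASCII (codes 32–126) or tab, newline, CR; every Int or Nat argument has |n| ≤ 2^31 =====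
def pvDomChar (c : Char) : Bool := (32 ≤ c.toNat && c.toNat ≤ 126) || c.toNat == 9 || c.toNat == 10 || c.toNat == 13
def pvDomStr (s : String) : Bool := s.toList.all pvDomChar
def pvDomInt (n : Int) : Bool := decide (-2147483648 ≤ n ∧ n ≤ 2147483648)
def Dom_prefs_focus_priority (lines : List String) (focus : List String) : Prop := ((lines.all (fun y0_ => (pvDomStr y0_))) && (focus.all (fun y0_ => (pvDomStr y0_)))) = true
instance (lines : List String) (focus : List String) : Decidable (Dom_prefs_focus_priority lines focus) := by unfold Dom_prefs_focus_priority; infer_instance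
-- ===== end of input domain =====

-- B replaces A's tuple-keyed sort of scored pairs by one partitioning pass plus two plain sorts (simpler decomposition, same cost).

-- ===== PORT A =====
-- the 'for token in focus' loop inside A's local 'score'
def pvScoreGo (lowered : String) (line : String) : List String → Int × String
  | [] => (1, line)
  | token :: rest =>
    if PySem.Str.isIn (PySem.Str.lower token) lowered then (0, line)
    else pvScoreGo lowered line rest

-- A's local 'score'
def pvScoreA (focus : List String) (line : String) : Int × String :=
  pvScoreGo (PySem.Str.lower line) line focus

def prefs_focus_priority (lines : List String) (focus : List String) : List String :=
  if focus = [] then lines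
  else
    (PySem.List.sorted2 (lines.map (fun line => (pvScoreA focus line, line)))
      (fun item => item.1.1) (fun item => item.1.2)).map (fun item => item.2)

-- ===== PORT B =====
def prefs_focus_priority_alt (lines : List String) (focus : List String) : List String :=
  if focus = [] then lines
  else
    let toks := focus.map PySem.Str.lower
    let mu := lines.foldl
      (fun (acc : List String × List String) line =>
        if toks.any (fun t => PySem.Str.isIn t (PySem.Str.lower line)) then
          (acc.1 ++ [line], acc.2)
        else
          (acc.1, acc.2 ++ [line]))
      ([], [])
    PySem.List.sorted mu.1 (fun x => x) ++ PySem.List.sorted mu.2 (fun x => x)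

-- ===== PRECONDITION & SPEC =====
def Spec_prefs_focus_priority (lines : List String) (focus : List String) (out : List String) : Prop := out = prefs_focus_priority_alt lines focus
instance (lines : List String) (focus : List String) (out : List String) : Decidable (Spec_prefs_focus_priority lines focus out) := by unfold Spec_prefs_focus_priority; infer_instance

-- ===== CLAIM (what is proved, stated in full; the proofs are below) =====
def Claim_equal_prefs_focus_priority : Prop := ∀ (lines : List String) (focus : List String), Dom_prefs_focus_priority lines focus → Spec_prefs_focus_priority lines focus (prefs_focus_priority lines focus)

-- ===== LEMMAS AND PROOFS =====

-- B's match predicate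
def pvQ (focus : List String) (line : String) : Bool :=
  (focus.map PySem.Str.lower).any (fun t => PySem.Str.isIn t (PySem.Str.lower line))

-- A's key on a line, as a linearly ordered value
def pvKey (focus : List String) (line : String) : Lex (Int × String) :=
  toLex ((if pvQ focus line then (0 : Int) else 1), line)

lemma pvQ_cons (t : String) (rest : List String) (line : String) :
    pvQ (t :: rest) line
      = (PySem.Str.isIn (PySem.Str.lower t) (PySem.Str.lower line) || pvQ rest line) := rfl

lemma pvScoreGo_eq (line : String) (focus : List String) :
    pvScoreGo (PySem.Str.lower line) line focus = ((if pvQ focus line then (0 : Int) else 1), line) := by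
  induction focus with
  | nil => simp [pvScoreGo, pvQ]
  | cons t rest ih =>
    rw [pvScoreGo, ih, pvQ_cons]
    cases h : PySem.Str.isIn (PySem.Str.lower t) (PySem.Str.lower line) <;>
      cases h2 : pvQ rest line <;> simp

-- the lexicographic 'before' test sorted2 uses equals the '<' of the Lex order
lemma pvLexLt {κ₁ κ₂ : Type} [LinearOrder κ₁] [LinearOrder κ₂] (a b : κ₁ × κ₂) :
    (decide (a.1 < b.1) || (!decide (b.1 < a.1) && decide (a.2 < b.2)))
      = decide (toLex a < toLex b) := by
  by_cases h1 : a.1 < b.1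
  · simp [Prod.Lex.toLex_lt_toLex, h1]
  · by_cases h2 : b.1 < a.1
    · have h3 : ¬ a.1 = b.1 := fun e => absurd h2 (by rw [e]; exact lt_irrefl _)
      simp [Prod.Lex.toLex_lt_toLex, h1, h2, h3]
    · have h3 : a.1 = b.1 := le_antisymm (not_lt.mp h2) (not_lt.mp h1)
      by_cases h4 : a.2 < b.2 <;> simp [Prod.Lex.toLex_lt_toLex, h3, h4]

lemma pvSorted2_eq_sorted_lex {α κ₁ κ₂ : Type} [LinearOrder κ₁] [LinearOrder κ₂]
    (xs : List α) (k1 : α → κ₁) (k2 : α → κ₂) :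
    PySem.List.sorted2 xs k1 k2 = PySem.List.sorted xs (fun x => toLex (k1 x, k2 x)) := by
  simp only [PySem.List.sorted2, PySem.List.sorted, if_neg (by decide : ¬ (false = true))]
  have : (fun a b => decide (k1 a < k1 b) || (!decide (k1 b < k1 a) && decide (k2 a < k2 b)))
      = (fun a b => decide (toLex (k1 a, k2 a) < toLex (k1 b, k2 b))) := by
    funext a b; exact pvLexLt (k1 a, k2 a) (k1 b, k2 b)
  rw [this]

lemma pvInsertBy_map {α β : Type} (g : α → β) (before : β → β → Bool) (x : α) (acc : List α) :
    PySem.List.insertBy before (g x) (acc.map g)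
      = (PySem.List.insertBy (fun a b => before (g a) (g b)) x acc).map g := by
  induction acc with
  | nil => simp [PySem.List.insertBy]
  | cons y ys ih =>
    simp only [List.map_cons, PySem.List.insertBy]
    by_cases h : before (g x) (g y) = true
    · simp [h]
    · simp only [Bool.not_eq_true] at h
      simp [h, ih]

lemma pvSorted_map {α β κ : Type} [LT κ] [DecidableLT κ] (g : α → β) (xs : List α) (key : β → κ) :
    PySem.List.sorted (xs.map g) key = (PySem.List.sorted xs (fun x => key (g x))).map g := by
  simp only [PySem.List.sorted, if_neg (by decide : ¬ (false = true)), List.foldl_map]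
  suffices h : ∀ (acc : List α),
      xs.foldl (fun acc x => PySem.List.insertBy (fun a b => decide (key a < key b)) (g x) acc) (acc.map g)
        = (xs.foldl (fun acc x => PySem.List.insertBy (fun a b => decide (key (g a) < key (g b))) x acc) acc).map g by
    simpa using h []
  induction xs with
  | nil => intro acc; simp
  | cons x rest ih =>
    intro acc
    simp only [List.foldl_cons, pvInsertBy_map g (fun a b => decide (key a < key b)) x acc]
    exact ih _

-- A's result is lines sorted by pvKey
lemma pvA_eq_sorted (lines focus : List String) (h : ¬ focus = []) :
    prefs_focus_priority lines focus = PySem.List.sorted lines (pvKey focus) := by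
  simp only [prefs_focus_priority, if_neg h]
  rw [pvSorted2_eq_sorted_lex, pvSorted_map (fun line => (pvScoreA focus line, line))
    lines (fun x => toLex (x.1.1, x.1.2))]
  simp only [List.map_map, Function.comp_def, pvScoreA, pvScoreGo_eq, List.map_id']
  rfl

-- the partitioning foldl of B computes the two filters
lemma pvFold_partition (focus : List String) (lines : List String) (m u : List String) :
    lines.foldl
      (fun (acc : List String × List String) line =>
        if (focus.map PySem.Str.lower).any (fun t => PySem.Str.isIn t (PySem.Str.lower line)) then
          (acc.1 ++ [line], acc.2)
        else
          (acc.1, acc.2 ++ [line]))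
      (m, u)
      = (m ++ lines.filter (pvQ focus), u ++ lines.filter (fun l => ! pvQ focus l)) := by
  induction lines generalizing m u with
  | nil => simp
  | cons l rest ih =>
    simp only [List.foldl_cons]
    rw [show ((focus.map PySem.Str.lower).any fun t => PySem.Str.isIn t (PySem.Str.lower l))
        = pvQ focus l from rfl]
    by_cases h : pvQ focus l = true
    · rw [if_pos h, ih]
      simp [h]
    · rw [if_neg h, ih]
      simp [h]

lemma pvB_eq (lines focus : List String) (h : ¬ focus = []) :
    prefs_focus_priority_alt lines focus
      = PySem.List.sorted (lines.filter (pvQ focus)) (fun x => x)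
        ++ PySem.List.sorted (lines.filter (fun l => ! pvQ focus l)) (fun x => x) := by
  simp only [prefs_focus_priority_alt, if_neg h]
  rw [pvFold_partition focus lines [] []]
  simp

lemma pvKey_injective (focus : List String) : Function.Injective (pvKey focus) := by
  intro a b hab
  have := congrArg (fun x => (ofLex x).2) hab
  simpa [pvKey] using this

theorem pv_main (lines focus : List String) :
    prefs_focus_priority lines focus = prefs_focus_priority_alt lines focus := by
  by_cases hf : focus = []
  · simp [prefs_focus_priority, prefs_focus_priority_alt, hf]
  · rw [pvA_eq_sorted lines focus hf, pvB_eq lines focus hf]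
    apply PySem.List.eq_of_perm_of_pairwise_le_of_injective (pvKey focus) (pvKey_injective focus)
    · -- permutation
      refine (PySem.List.sorted_perm _ _ _).trans ?_
      refine ((((PySem.List.sorted_perm _ _ _).append (PySem.List.sorted_perm _ _ _)).trans
        (List.filter_append_perm (pvQ focus) lines))).symm
    · exact PySem.List.sorted_pairwise lines (pvKey focus)
    · -- RHS pairwise under pvKey
      rw [List.pairwise_append]
      refine ⟨?_, ?_, ?_⟩
      · have hp := PySem.List.sorted_pairwise (lines.filter (pvQ focus)) (fun x => x)
        refine hp.imp_of_mem ?_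
        intro a b ha hb hab
        have ha' : pvQ focus a = true := (List.mem_filter.mp ((PySem.List.mem_sorted _ _ _ _).mp ha)).2
        have hb' : pvQ focus b = true := (List.mem_filter.mp ((PySem.List.mem_sorted _ _ _ _).mp hb)).2
        simp only [pvKey, ha', hb', if_true]
        exact Prod.Lex.toLex_le_toLex.mpr (Or.inr ⟨rfl, hab⟩)
      · have hp := PySem.List.sorted_pairwise (lines.filter (fun l => ! pvQ focus l)) (fun x => x)
        refine hp.imp_of_mem ?_
        intro a b ha hb hab
        have ha' : pvQ focus a = false := by
          simpa using (List.mem_filter.mp ((PySem.List.mem_sorted _ _ _ _).mp ha)).2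
        have hb' : pvQ focus b = false := by
          simpa using (List.mem_filter.mp ((PySem.List.mem_sorted _ _ _ _).mp hb)).2
        simp only [pvKey, ha', hb', Bool.false_eq_true, if_false]
        exact Prod.Lex.toLex_le_toLex.mpr (Or.inr ⟨rfl, hab⟩)
      · intro a ha b hb
        have ha' : pvQ focus a = true := (List.mem_filter.mp ((PySem.List.mem_sorted _ _ _ _).mp ha)).2
        have hb' : pvQ focus b = false := by
          simpa using (List.mem_filter.mp ((PySem.List.mem_sorted _ _ _ _).mp hb)).2
        simp only [pvKey, ha', hb', Bool.false_eq_true, if_true, if_false]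
        exact le_of_lt (Prod.Lex.toLex_lt_toLex.mpr (Or.inl (by norm_num)))

-- ===== VERDICT (by name: the statement is the Claim_ definition above) =====
theorem prefs_focus_priority_spec : Claim_equal_prefs_focus_priority := by
  intro lines focus _
  exact pv_main lines focus
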